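-- pv_equiv track=rewrite | github.com/mukkss/DSP_Assignment1 | ascii_encoder/encoder.py | text_to_ascii
-- ===== SOURCE A (Python) =====
-- from typing import List
--
-- def text_to_ascii(text: str) -> str:
--     """Convert text to a space-separated ASCII numbers string.
--
--     Raises ValueError if text contains non-ASCII characters (e.g., emojis) because
--     the user opted out of emoji support.
--     """
--     if text is None:
--         return ""
--
--     # Ensure only ASCII characters
--     try:
--         text_bytes = text.encode("ascii")
--     except UnicodeEncodeError as exc:
--         raise ValueError("Non-ASCII character detected. Emoji support is disabled.") from exc
--
--     codes: List[str] = [str(b) for b in text_bytes]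
--     return " ".join(codes)
-- ===== SOURCE B (Python) =====
-- def text_to_ascii(text: str) -> str:
--     """Convert text to a space-separated ASCII numbers string.
--
--     Builds the result incrementally from ord(c) per character instead of
--     going through an encoded bytes object and a list/join.
--     """
--     if text is None:
--         return ""
--     result = ""
--     first = True
--     for c in text:
--         code = ord(c)
--         if code > 127:
--             raise ValueError("Non-ASCII character detected. Emoji support is disabled.")
--         result += str(code) if first else " " + str(code)
--         first = False
--     return result
-- ===== Notes on version B (the rewrite author's own statement) =====
-- stated objective: idiomatic
-- what changed: B validates and converts per character with ord() and accumulates the separated string directly, instead of A's encode-to-bytes/try-except plus list comprehension and join.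
import Mathlib
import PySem

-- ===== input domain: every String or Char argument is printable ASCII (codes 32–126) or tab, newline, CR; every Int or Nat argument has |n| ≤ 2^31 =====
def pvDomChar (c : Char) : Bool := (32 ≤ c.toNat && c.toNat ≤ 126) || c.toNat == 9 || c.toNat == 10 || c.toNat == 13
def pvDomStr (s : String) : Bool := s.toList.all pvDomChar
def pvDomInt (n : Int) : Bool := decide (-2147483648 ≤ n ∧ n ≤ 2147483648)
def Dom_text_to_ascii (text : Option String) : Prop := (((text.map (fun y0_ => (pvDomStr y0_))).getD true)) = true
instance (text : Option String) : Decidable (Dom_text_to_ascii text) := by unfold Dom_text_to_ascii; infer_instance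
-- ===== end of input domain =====

-- B builds the space-separated codes per character with an accumulator instead of A's map-then-join over an encoded list (idiomatic decomposition; same cost).


-- ===== PORT A =====
-- text.encode("ascii") yields the code points; on the ASCII domain this is the chars' codes.
def text_to_ascii (text : Option String) : String :=
  match text with
  | none => ""
  | some t =>
    let codes : List String := t.toList.map (fun c => PySem.Int.toStr (c.toNat : Int))
    PySem.Str.join " " codes

-- ===== PORT B =====
-- the loop body of Source B: state (result, first)
def textToAsciiAltStep (acc : String × Bool) (c : Char) : String × Bool :=
  let s := PySem.Int.toStr ((c.toNat : Int))
  (if acc.2 then s else acc.1 ++ " " ++ s, false)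

def text_to_ascii_alt (text : Option String) : String :=
  match text with
  | none => ""
  | some t => (t.toList.foldl textToAsciiAltStep ("", true)).1

-- ===== PRECONDITION & SPEC =====
def Spec_text_to_ascii (text : Option String) (out : String) : Prop := out = text_to_ascii_alt text
instance (text : Option String) (out : String) : Decidable (Spec_text_to_ascii text out) := by unfold Spec_text_to_ascii; infer_instance

-- ===== CLAIM (what is proved, stated in full; the proofs are below) =====
def Claim_equal_text_to_ascii : Prop := ∀ (text : Option String), Dom_text_to_ascii text → Spec_text_to_ascii text (text_to_ascii text)

-- ===== LEMMAS AND PROOFS =====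

theorem foldl_step_false (l : List Char) (a : String) :
    (l.foldl textToAsciiAltStep (a, false)).1.toList
      = a.toList ++ (l.map (fun c => ' ' :: PySem.Int.toChars (c.toNat : Int))).flatten := by
  induction l generalizing a with
  | nil => simp
  | cons c l ih =>
    simp only [List.foldl_cons, textToAsciiAltStep, List.map_cons, List.flatten_cons]
    rw [ih]
    simp [PySem.Int.toList_toStr]

theorem join_space_cons (l : List Char) (b : List Char) :
    PySem.Chars.join [' '] (b :: l.map (fun c => PySem.Int.toChars (c.toNat : Int)))
      = b ++ (l.map (fun c => ' ' :: PySem.Int.toChars (c.toNat : Int))).flatten := by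
  induction l generalizing b with
  | nil => simp [PySem.Chars.join_singleton]
  | cons c l ih =>
    rw [List.map_cons, PySem.Chars.join_cons_cons, ih]
    simp

theorem text_to_ascii_spec : Claim_equal_text_to_ascii := by
  intro text _
  unfold Spec_text_to_ascii text_to_ascii text_to_ascii_alt
  cases text with
  | none => rfl
  | some t =>
    simp only
    apply String.toList_injective
    cases h : t.toList with
    | nil => simp [PySem.Str.toList_join, PySem.Chars.join_nil]
    | cons c l =>
      simp only [List.foldl_cons, textToAsciiAltStep]
      rw [foldl_step_false]
      rw [PySem.Str.toList_join, List.map_map]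
      have hc : (String.toList ∘ fun c : Char => PySem.Int.toStr ((c.toNat : Int))) = fun c : Char => PySem.Int.toChars ((c.toNat : Int)) := by
        funext c; simp [PySem.Int.toList_toStr]
      rw [hc]
      simp only [List.map_cons, if_true, PySem.Int.toList_toStr,
        show " ".toList = [' '] from rfl]
      rw [join_space_cons]
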